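-- pv_equiv track=rewrite | github.com/andrei-i-gavrila/advent-of-code-2021 | day_5.py | diagonal_to_lines
-- ===== SOURCE A (Python) =====
-- def diagonal_to_lines(diagonal):
--     x1 = diagonal[0][1]
--     x2 = diagonal[1][1]
--     y1 = diagonal[0][0]
--     y2 = diagonal[1][0]
--     dx = 1 if x2 > x1 else -1
--     dy = 1 if y2 > y1 else -1
--     lines = [((y1,x1), (y1,x1))]
--     cx = x1
--     cy = y1
--     while cx != x2:
--         cx += dx
--         cy += dy
--         lines.append(((cy,cx), (cy,cx)))
--
--     return lines
-- ===== SOURCE B (Python) =====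
-- def diagonal_to_lines(diagonal):
--     (y1, x1), (y2, x2) = diagonal
--     dx = 1 if x2 > x1 else -1
--     dy = 1 if y2 > y1 else -1
--     n = abs(x2 - x1)
--     return [((y1 + i * dy, x1 + i * dx),) * 2 for i in range(n + 1)]
-- ===== Notes on version B (the rewrite author's own statement) =====
-- stated objective: simpler
-- what changed: Replaces the mutable cx/cy cursor and the while-until-equal loop with a single list comprehension over a bounded index range, computing each point's coordinates in closed form (x1 + i*dx, y1 + i*dy).
import Mathlib
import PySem

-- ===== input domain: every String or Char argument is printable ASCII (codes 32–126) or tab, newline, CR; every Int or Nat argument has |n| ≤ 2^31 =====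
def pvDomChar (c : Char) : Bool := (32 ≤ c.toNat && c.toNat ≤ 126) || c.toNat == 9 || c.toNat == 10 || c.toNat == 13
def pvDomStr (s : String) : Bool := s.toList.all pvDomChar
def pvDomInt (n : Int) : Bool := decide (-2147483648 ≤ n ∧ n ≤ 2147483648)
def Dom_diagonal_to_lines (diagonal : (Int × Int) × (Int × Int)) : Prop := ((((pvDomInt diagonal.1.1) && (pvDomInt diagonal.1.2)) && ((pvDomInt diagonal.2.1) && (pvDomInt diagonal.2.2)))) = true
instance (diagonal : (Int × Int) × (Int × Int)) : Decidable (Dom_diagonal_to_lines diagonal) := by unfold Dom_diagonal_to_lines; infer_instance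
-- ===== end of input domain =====

-- B replaces A's mutable cursor/while-loop with a closed-form list comprehension over a bounded index range (simpler).
-- ===== PORT A =====
-- A's while loop; fuel = (x2 - x1).natAbs is exactly the number of iterations A's loop performs
def pvALoop (dx dy : Int) : Nat → Int → Int → List ((Int × Int) × (Int × Int))
  | 0, _, _ => []
  | n + 1, cx, cy =>
    let cx' := cx + dx
    let cy' := cy + dy
    ((cy', cx'), (cy', cx')) :: pvALoop dx dy n cx' cy'

def diagonal_to_lines (diagonal : (Int × Int) × (Int × Int)) : List ((Int × Int) × (Int × Int)) :=
  let x1 := diagonal.1.2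
  let x2 := diagonal.2.2
  let y1 := diagonal.1.1
  let y2 := diagonal.2.1
  let dx : Int := if x2 > x1 then 1 else -1
  let dy : Int := if y2 > y1 then 1 else -1
  ((y1, x1), (y1, x1)) :: pvALoop dx dy (x2 - x1).natAbs x1 y1

-- ===== PORT B =====
def diagonal_to_lines_alt (diagonal : (Int × Int) × (Int × Int)) : List ((Int × Int) × (Int × Int)) :=
  let y1 := diagonal.1.1
  let x1 := diagonal.1.2
  let y2 := diagonal.2.1
  let x2 := diagonal.2.2
  let dx : Int := if x2 > x1 then 1 else -1
  let dy : Int := if y2 > y1 then 1 else -1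
  let n := (x2 - x1).natAbs
  (List.range (n + 1)).map (fun (i : Nat) =>
    ((y1 + (i : Int) * dy, x1 + (i : Int) * dx), (y1 + (i : Int) * dy, x1 + (i : Int) * dx)))

-- ===== PRECONDITION & SPEC =====
def Spec_diagonal_to_lines (diagonal : (Int × Int) × (Int × Int)) (out : List ((Int × Int) × (Int × Int))) : Prop := out = diagonal_to_lines_alt diagonal
instance (diagonal : (Int × Int) × (Int × Int)) (out : List ((Int × Int) × (Int × Int))) : Decidable (Spec_diagonal_to_lines diagonal out) := by unfold Spec_diagonal_to_lines; infer_instance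

-- ===== CLAIM (what is proved, stated in full; the proofs are below) =====
def Claim_equal_diagonal_to_lines : Prop := ∀ (diagonal : (Int × Int) × (Int × Int)), Dom_diagonal_to_lines diagonal → Spec_diagonal_to_lines diagonal (diagonal_to_lines diagonal)

-- ===== LEMMAS AND PROOFS =====
lemma pvALoop_eq (dx dy : Int) : ∀ (n : Nat) (cx cy : Int),
    pvALoop dx dy n cx cy =
      (List.range n).map (fun (i : Nat) =>
        ((cy + ((i : Int) + 1) * dy, cx + ((i : Int) + 1) * dx),
         (cy + ((i : Int) + 1) * dy, cx + ((i : Int) + 1) * dx))) := by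
  intro n
  induction n with
  | zero => intro cx cy; rfl
  | succ n ih =>
    intro cx cy
    show _ :: pvALoop dx dy n (cx + dx) (cy + dy) = _
    rw [ih, List.range_succ_eq_map, List.map_cons, List.map_map]
    refine congrArg₂ _ (by norm_num) (List.map_congr_left fun i _ => ?_)
    have h : ((i + 1 : Nat) : Int) = (i : Int) + 1 := by push_cast; ring
    simp only [Function.comp_apply, Nat.succ_eq_add_one, h]
    ring_nf

-- ===== VERDICT (by name: the statement is the Claim_ definition above) =====
theorem diagonal_to_lines_spec : Claim_equal_diagonal_to_lines := by
  intro d _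
  obtain ⟨⟨y1, x1⟩, y2, x2⟩ := d
  unfold Spec_diagonal_to_lines diagonal_to_lines diagonal_to_lines_alt
  dsimp only
  rw [pvALoop_eq, List.range_succ_eq_map, List.map_cons, List.map_map]
  refine congrArg₂ _ (by norm_num) (List.map_congr_left fun i _ => ?_)
  have h : ((i + 1 : Nat) : Int) = (i : Int) + 1 := by push_cast; ring
  simp only [Function.comp_apply, Nat.succ_eq_add_one, h]
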